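-- pv_equiv track=rewrite | github.com/maksimkaprosuperhacker69/Bulls_and_Cows | app.py | validate_feedback_consistency
-- ===== SOURCE A (Python) =====
-- def bulls_cows(secret, guess):
--     """
--     Calculate bulls and cows for a guess.
--     Bulls: correct digit in correct position
--     Cows: correct digit in wrong position
--     """
--     secret = str(secret)
--     guess = str(guess)
--     bulls = sum(s == g for s, g in zip(secret, guess))
--
--     # Count all matching digits, then subtract bulls to get cows
--     secret_chars = list(secret)
--     guess_chars = list(guess)
--
--     # Count cows: digits that are in secret but not in correct position
--     cows = 0
--     for char in set(secret):
--         secret_count = secret.count(char)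
--         guess_count = guess.count(char)
--         # Count how many of this char are in correct position (bulls)
--         bulls_for_char = sum(1 for s, g in zip(secret, guess) if s == g == char)
--         # Cows = min of counts minus the bulls
--         cows += min(secret_count, guess_count) - bulls_for_char
--
--     return bulls, cows
--
-- def validate_feedback_consistency(candidates, last_guess, bulls, cows, word_length):
--     """
--     Check if the feedback is consistent with previous candidates.
--     Returns (is_valid, error_message)
--     """
--     if not candidates:
--         return False, "No candidates left"
--
--     # Check if any candidate matches this feedback
--     matching = [c for c in candidates if bulls_cows(c, last_guess) == (bulls, cows)]
--
--     if not matching: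
--         return False, "Inconsistent feedback: No valid sequences match this result. Please check your bulls/cows count."
--
--     # Check if bulls + cows exceeds word length (impossible)
--     if bulls + cows > word_length:
--         return False, f"Inconsistent feedback: Bulls ({bulls}) + Cows ({cows}) cannot exceed sequence length ({word_length})"
--
--     # Check if bulls equals word_length but cows > 0 (impossible)
--     if bulls == word_length and cows > 0:
--         return False, f"Inconsistent feedback: If all digits are correct (bulls={word_length}), cows must be 0"
--
--     return True, None
-- ===== SOURCE B (Python) =====
-- def _bulls_cows(secret, guess):
--     """Classic two-phase bulls/cows: one classification pass over the zipped
--     pair, then a multiset intersection of the non-bull leftovers."""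
--     secret = str(secret)
--     guess = str(guess)
--     bulls = 0
--     secret_left = {}
--     guess_left = {}
--     for s, g in zip(secret, guess):
--         if s == g:
--             bulls += 1
--         else:
--             secret_left[s] = secret_left.get(s, 0) + 1
--             guess_left[g] = guess_left.get(g, 0) + 1
--     for s in secret[len(guess):]:
--         secret_left[s] = secret_left.get(s, 0) + 1
--     for g in guess[len(secret):]:
--         guess_left[g] = guess_left.get(g, 0) + 1
--     cows = sum(min(n, guess_left.get(ch, 0)) for ch, n in secret_left.items())
--     return bulls, cows
--
--
-- def validate_feedback_consistency(candidates, last_guess, bulls, cows, word_length):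
--     if not candidates:
--         return False, "No candidates left"
--
--     if not any(_bulls_cows(c, last_guess) == (bulls, cows) for c in candidates):
--         return False, "Inconsistent feedback: No valid sequences match this result. Please check your bulls/cows count."
--
--     if bulls + cows > word_length:
--         return False, f"Inconsistent feedback: Bulls ({bulls}) + Cows ({cows}) cannot exceed sequence length ({word_length})"
--
--     if bulls == word_length and cows > 0:
--         return False, f"Inconsistent feedback: If all digits are correct (bulls={word_length}), cows must be 0"
--
--     return True, None
-- ===== Notes on version B (the rewrite author's own statement) =====
-- stated objective: alternative
-- what changed: bulls_cows is rewritten as the classic two-phase algorithm: one classification pass over zip(secret, guess) building the non-bull leftover multisets (plus the length overhangs), then cows = multiset intersection of the leftovers, replacing A's loop over set(secret) that rescans secret, guess and the zipped pairs per distinct character; the wrapper tests any() instead of building the matching list.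
import Mathlib
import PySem

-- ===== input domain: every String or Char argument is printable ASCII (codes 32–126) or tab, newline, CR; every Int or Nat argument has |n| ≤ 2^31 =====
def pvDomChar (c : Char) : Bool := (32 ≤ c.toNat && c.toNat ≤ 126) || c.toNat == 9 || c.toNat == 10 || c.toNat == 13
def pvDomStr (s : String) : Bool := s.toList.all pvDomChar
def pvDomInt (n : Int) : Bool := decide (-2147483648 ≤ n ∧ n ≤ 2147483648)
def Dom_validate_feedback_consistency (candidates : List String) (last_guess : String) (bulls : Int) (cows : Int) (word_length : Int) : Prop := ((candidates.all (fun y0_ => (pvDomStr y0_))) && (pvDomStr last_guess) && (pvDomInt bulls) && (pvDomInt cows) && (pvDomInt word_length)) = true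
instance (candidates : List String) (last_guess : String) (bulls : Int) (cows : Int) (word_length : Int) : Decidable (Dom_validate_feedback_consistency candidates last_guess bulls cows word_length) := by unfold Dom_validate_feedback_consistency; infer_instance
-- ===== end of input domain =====

-- B replaces A's per-distinct-char counting loop in bulls_cows (which rescans secret, guess
-- and the zipped pairs for every distinct secret char) by the classic two-phase algorithm:
-- one classification pass building the non-bull leftover multisets, then one multiset
-- intersection; the wrapper uses any() instead of building the matching list.

-- ===== PORT A =====
-- bulls_cows of Source A; operates on the character lists (str() of a str is itself; the sum over
-- set(secret) is consumed order-insensitively, so PySem.Set.ofList order is exact).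
def pvBullsCows (secret guess : List Char) : Int × Int :=
  let z := secret.zip guess
  let bulls : Int := z.foldl (fun a p => if p.1 == p.2 then a + 1 else a) 0
  let cows : Int := (PySem.Set.ofList secret).foldl (fun a c =>
      let secret_count : Int := (secret.count c : Int)
      let guess_count : Int := (guess.count c : Int)
      let bulls_for_char : Int := z.foldl (fun b p => if p.1 == p.2 && p.2 == c then b + 1 else b) 0
      a + (min secret_count guess_count - bulls_for_char)) 0
  (bulls, cows)

def validate_feedback_consistency (candidates : List String) (last_guess : String) (bulls : Int) (cows : Int) (word_length : Int) : Bool × Option String :=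
  if candidates.isEmpty then (false, some "No candidates left")
  else
    let matching := candidates.filter (fun c => pvBullsCows c.toList last_guess.toList == (bulls, cows))
    if matching.isEmpty then
      (false, some "Inconsistent feedback: No valid sequences match this result. Please check your bulls/cows count.")
    else if bulls + cows > word_length then
      (false, some ("Inconsistent feedback: Bulls (" ++ PySem.Int.toStr bulls ++ ") + Cows (" ++ PySem.Int.toStr cows ++ ") cannot exceed sequence length (" ++ PySem.Int.toStr word_length ++ ")"))
    else if bulls == word_length && cows > 0 then
      (false, some ("Inconsistent feedback: If all digits are correct (bulls=" ++ PySem.Int.toStr word_length ++ "), cows must be 0"))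
    else (true, none)

-- ===== PORT B =====
-- _bulls_cows of Source B: one pass over the zip with state (bulls, secret_left, guess_left),
-- then the overhangs secret[len(guess):] / guess[len(secret):] (index ≥ 0, so slice = drop, exact),
-- then cows = multiset intersection of the leftovers.
def pvBullsCowsAlt (secret guess : List Char) : Int × Int :=
  let st := (secret.zip guess).foldl
      (fun (st : Int × PySem.Dict Char Int × PySem.Dict Char Int) p =>
        if p.1 == p.2 then (st.1 + 1, st.2.1, st.2.2)
        else (st.1, st.2.1.insert p.1 (st.2.1.getD p.1 0 + 1),
                    st.2.2.insert p.2 (st.2.2.getD p.2 0 + 1)))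
      (0, PySem.Dict.empty, PySem.Dict.empty)
  let secret_left := (secret.drop guess.length).foldl (fun d x => d.insert x (d.getD x 0 + 1)) st.2.1
  let guess_left := (guess.drop secret.length).foldl (fun d x => d.insert x (d.getD x 0 + 1)) st.2.2
  let cows : Int := secret_left.items.foldl (fun a kv => a + min kv.2 (guess_left.getD kv.1 0)) 0
  (st.1, cows)


def validate_feedback_consistency_alt (candidates : List String) (last_guess : String) (bulls : Int) (cows : Int) (word_length : Int) : Bool × Option String :=
  if candidates.isEmpty then (false, some "No candidates left")
  else if !(candidates.any (fun c => pvBullsCowsAlt c.toList last_guess.toList == (bulls, cows))) then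
    (false, some "Inconsistent feedback: No valid sequences match this result. Please check your bulls/cows count.")
  else if bulls + cows > word_length then
    (false, some ("Inconsistent feedback: Bulls (" ++ PySem.Int.toStr bulls ++ ") + Cows (" ++ PySem.Int.toStr cows ++ ") cannot exceed sequence length (" ++ PySem.Int.toStr word_length ++ ")"))
  else if bulls == word_length && cows > 0 then
    (false, some ("Inconsistent feedback: If all digits are correct (bulls=" ++ PySem.Int.toStr word_length ++ "), cows must be 0"))
  else (true, none)

-- ===== PRECONDITION & SPEC =====
def Spec_validate_feedback_consistency (candidates : List String) (last_guess : String) (bulls : Int) (cows : Int) (word_length : Int) (out : Bool × Option String) : Prop := out = validate_feedback_consistency_alt candidates last_guess bulls cows word_length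
instance (candidates : List String) (last_guess : String) (bulls : Int) (cows : Int) (word_length : Int) (out : Bool × Option String) : Decidable (Spec_validate_feedback_consistency candidates last_guess bulls cows word_length out) := by unfold Spec_validate_feedback_consistency; infer_instance

-- ===== CLAIM (what is proved, stated in full; the proofs are below) =====
def Claim_equal_validate_feedback_consistency : Prop := ∀ (candidates : List String) (last_guess : String) (bulls : Int) (cows : Int) (word_length : Int), Dom_validate_feedback_consistency candidates last_guess bulls cows word_length → Spec_validate_feedback_consistency candidates last_guess bulls cows word_length (validate_feedback_consistency candidates last_guess bulls cows word_length)

-- triple-fold splitting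
theorem trip (z : List (Char × Char)) (a : Int) (d1 d2 : PySem.Dict Char Int) :
    z.foldl (fun (st : Int × PySem.Dict Char Int × PySem.Dict Char Int) p =>
       if p.1 == p.2 then (st.1 + 1, st.2.1, st.2.2)
       else (st.1, st.2.1.insert p.1 (st.2.1.getD p.1 0 + 1), st.2.2.insert p.2 (st.2.2.getD p.2 0 + 1)))
      (a, d1, d2)
  = (z.foldl (fun b p => if p.1 == p.2 then b + 1 else b) a,
     ((z.filter (fun p => !(p.1 == p.2))).map Prod.fst).foldl (fun d x => d.insert x (d.getD x 0 + 1)) d1,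
     ((z.filter (fun p => !(p.1 == p.2))).map Prod.snd).foldl (fun d x => d.insert x (d.getD x 0 + 1)) d2) := by
  induction z generalizing a d1 d2 with
  | nil => rfl
  | cons p t ih =>
    cases h : (p.1 == p.2) <;>
      simp only [List.foldl_cons, List.filter_cons, h, Bool.not_true, Bool.not_false,
        if_true, List.map_cons] <;>
      exact ih _ _ _

theorem countP_split {α : Type} (l : List α) (q p : α → Bool) :
    l.countP p = l.countP (fun x => q x && p x) + l.countP (fun x => !q x && p x) := by
  induction l with
  | nil => rfl
  | cons x t ih =>
    cases hq : q x <;> cases hp : p x <;> simp [hq, hp, ih] <;> omega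

theorem zip_map_fst (s g : List Char) : (s.zip g).map Prod.fst = s.take g.length := by
  induction s generalizing g with
  | nil => simp
  | cons x t ih => cases g <;> simp [ih]

theorem zip_map_snd (s g : List Char) : (s.zip g).map Prod.snd = g.take s.length := by
  induction s generalizing g with
  | nil => simp
  | cons x t ih => cases g <;> simp [ih]


-- the per-character identity
theorem char_identity (secret guess : List Char) (c : Char) :
    min ((secret.count c : Int)) ((guess.count c : Int))
      - ((secret.zip guess).countP (fun p => p.1 == p.2 && p.2 == c) : Int)
    = min ((((((secret.zip guess).filter (fun p => !(p.1 == p.2))).map Prod.fst)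
              ++ secret.drop guess.length).count c : Int))
          ((((((secret.zip guess).filter (fun p => !(p.1 == p.2))).map Prod.snd)
              ++ guess.drop secret.length).count c : Int)) := by
  set z := secret.zip guess with hz
  have hbfc : (fun p : Char × Char => p.1 == p.2 && p.2 == c)
            = (fun p : Char × Char => p.1 == p.2 && p.1 == c) := by
    funext p
    by_cases h12 : p.1 = p.2
    · simp [h12]
    · simp [beq_false_of_ne h12]
  have hs : secret.count c
      = z.countP (fun p => p.1 == p.2 && p.1 == c)
        + ((z.filter (fun p => !(p.1 == p.2))).map Prod.fst ++ secret.drop guess.length).count c := by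
    conv_lhs => rw [← List.take_append_drop guess.length secret]
    rw [List.count_append, List.count_append, ← zip_map_fst secret guess, ← hz]
    have h1 : (z.map Prod.fst).count c = z.countP (fun p => p.1 == c) := by
      rw [List.count_eq_countP, List.countP_map]; rfl
    have h2 : ((z.filter (fun p => !(p.1 == p.2))).map Prod.fst).count c
        = z.countP (fun p => !(p.1 == p.2) && p.1 == c) := by
      rw [List.count_eq_countP, List.countP_map, List.countP_filter]
      congr 1; funext p; simp [Bool.and_comm]
    rw [h1, h2, countP_split z (fun p => p.1 == p.2) (fun p => p.1 == c)]
    omega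
  have hg : guess.count c
      = z.countP (fun p => p.1 == p.2 && p.2 == c)
        + ((z.filter (fun p => !(p.1 == p.2))).map Prod.snd ++ guess.drop secret.length).count c := by
    conv_lhs => rw [← List.take_append_drop secret.length guess]
    rw [List.count_append, List.count_append, ← zip_map_snd secret guess, ← hz]
    have h1 : (z.map Prod.snd).count c = z.countP (fun p => p.2 == c) := by
      rw [List.count_eq_countP, List.countP_map]; rfl
    have h2 : ((z.filter (fun p => !(p.1 == p.2))).map Prod.snd).count c
        = z.countP (fun p => !(p.1 == p.2) && p.2 == c) := by
      rw [List.count_eq_countP, List.countP_map, List.countP_filter]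
      congr 1; funext p; simp [Bool.and_comm]
    rw [h1, h2, countP_split z (fun p => p.1 == p.2) (fun p => p.2 == c)]
    omega
  rw [hbfc, hs, hg, hbfc]
  push_cast
  omega

theorem toFinset_ofList {α : Type} [DecidableEq α] (xs : List α) :
    (PySem.Set.ofList xs).toFinset = xs.toFinset := by
  ext x; simp [PySem.Set.mem_ofList]

theorem sum_set_restrict {α : Type} [DecidableEq α] (big small : List α) (f : α → Int)
    (hsub : ∀ x ∈ small, x ∈ big) (hzero : ∀ x, x ∉ small → f x = 0) :
    ((PySem.Set.ofList big).map f).sum = ((PySem.Set.ofList small).map f).sum := by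
  rw [← List.sum_toFinset f (PySem.Set.nodup_ofList big),
      ← List.sum_toFinset f (PySem.Set.nodup_ofList small),
      toFinset_ofList, toFinset_ofList]
  refine (Finset.sum_subset ?_ ?_).symm
  · intro x hx; simp only [List.mem_toFinset] at hx ⊢; exact hsub x hx
  · intro x _ hx; simp only [List.mem_toFinset] at hx; exact hzero x hx

theorem pvBC_eq (secret guess : List Char) : pvBullsCows secret guess = pvBullsCowsAlt secret guess := by
  unfold pvBullsCows pvBullsCowsAlt
  rw [trip]
  simp only []
  set z := secret.zip guess with hz
  set sL := (z.filter (fun p => !(p.1 == p.2))).map Prod.fst ++ secret.drop guess.length with hsL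
  set gL := (z.filter (fun p => !(p.1 == p.2))).map Prod.snd ++ guess.drop secret.length with hgL
  have hscnt : (secret.drop guess.length).foldl (fun d x => d.insert x (d.getD x 0 + 1))
        (((z.filter (fun p => !(p.1 == p.2))).map Prod.fst).foldl (fun d x => d.insert x (d.getD x 0 + 1)) PySem.Dict.empty)
      = PySem.Dict.counter sL := by
    rw [← List.foldl_append]
    exact PySem.Dict.foldl_insert_getD_add_one_eq_counter _
  have hgcnt : (guess.drop secret.length).foldl (fun d x => d.insert x (d.getD x 0 + 1))
        (((z.filter (fun p => !(p.1 == p.2))).map Prod.snd).foldl (fun d x => d.insert x (d.getD x 0 + 1)) PySem.Dict.empty)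
      = PySem.Dict.counter gL := by
    rw [← List.foldl_append]
    exact PySem.Dict.foldl_insert_getD_add_one_eq_counter _
  rw [hscnt, hgcnt]
  refine Prod.ext rfl ?_
  -- cows
  rw [PySem.List.foldl_add (g := fun kv : Char × Int => min kv.2 ((PySem.Dict.counter gL).getD kv.1 0))]
  rw [PySem.Dict.items_counter, List.map_map]
  -- A side: rewrite the inner bulls_for_char fold and the outer accumulation
  rw [PySem.List.foldl_add (g := fun c => min (secret.count c : Int) (guess.count c : Int)
        - z.foldl (fun b p => if p.1 == p.2 && p.2 == c then b + 1 else b) 0)]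
  simp only [zero_add]
  have hA : ∀ c : Char,
      min (secret.count c : Int) (guess.count c : Int)
        - z.foldl (fun b p => if p.1 == p.2 && p.2 == c then b + 1 else b) 0
      = min ((sL.count c : Int)) ((gL.count c : Int)) := by
    intro c
    rw [PySem.List.foldl_if_add_one (p := fun p : Char × Char => p.1 == p.2 && p.2 == c), zero_add]
    exact char_identity secret guess c
  have hmapA : (PySem.Set.ofList secret).map (fun c =>
        min (secret.count c : Int) (guess.count c : Int)
          - z.foldl (fun b p => if p.1 == p.2 && p.2 == c then b + 1 else b) 0)
      = (PySem.Set.ofList secret).map (fun c => min ((sL.count c : Int)) ((gL.count c : Int))) :=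
    List.map_congr_left (fun c _ => hA c)
  rw [hmapA]
  have hBmap : (PySem.Set.ofList sL).map
        ((fun kv : Char × Int => min kv.2 ((PySem.Dict.counter gL).getD kv.1 0)) ∘ fun k => (k, (sL.count k : Int)))
      = (PySem.Set.ofList sL).map (fun c => min ((sL.count c : Int)) ((gL.count c : Int))) := by
    apply List.map_congr_left; intro c _
    simp [PySem.Dict.getD_counter]
  rw [hBmap]
  exact sum_set_restrict secret sL _
    (by
      intro x hx
      rcases List.mem_append.mp (hsL ▸ hx) with h | h
      · rcases List.mem_map.mp h with ⟨p, hp, rfl⟩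
        exact (List.of_mem_zip (List.mem_filter.mp hp).1).1
      · exact List.mem_of_mem_drop h)
    (by
      intro x hx
      have : sL.count x = 0 := List.count_eq_zero.mpr hx
      simp [this])

theorem isEmpty_filter_eq_not_any {α : Type} (l : List α) (p : α → Bool) :
    (l.filter p).isEmpty = !(l.any p) := by
  induction l with
  | nil => rfl
  | cons x t ih => by_cases h : p x <;> simp [h, ih]

-- ===== VERDICT (by name: the statement is the Claim_ definition above) =====
theorem validate_feedback_consistency_spec : Claim_equal_validate_feedback_consistency := by
  intro candidates last_guess bulls cows word_length _
  unfold Spec_validate_feedback_consistency validate_feedback_consistency validate_feedback_consistency_alt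
  simp only [pvBC_eq, isEmpty_filter_eq_not_any]
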